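-- pv_equiv track=rewrite | github.com/ASSERT-KTH/Mokav | experiments/pynguin/c4b/return-lst/generated_tests/src_2595/5/src_2595.py | func
-- ===== SOURCE A (Python) =====
-- def func(*args):
-- 	ret_values = []
--
-- 	n = int(args[0])
-- 	ans = ''
-- 	if ((n % 2) != 0):
-- 	    ans += '7'
-- 	    n -= 3
-- 	while (n >= 2):
-- 	    ans += '1'
-- 	    n -= 2
-- 	ret_values.append(ans)
--
-- 	return ret_values
-- ===== SOURCE B (Python) =====
-- def func(*args):
--     n = int(args[0])
--     if n % 2 != 0:
--         return ['7' + '1' * ((n - 3) // 2 if n >= 3 else 0)]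
--     return ['1' * (n // 2 if n >= 0 else 0)]
-- ===== Notes on version B (the rewrite author's own statement) =====
-- stated objective: faster
-- what changed: Replaces the character-by-character while loop (quadratic string concatenation) with a closed-form count and a single string multiplication.
import Mathlib
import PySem

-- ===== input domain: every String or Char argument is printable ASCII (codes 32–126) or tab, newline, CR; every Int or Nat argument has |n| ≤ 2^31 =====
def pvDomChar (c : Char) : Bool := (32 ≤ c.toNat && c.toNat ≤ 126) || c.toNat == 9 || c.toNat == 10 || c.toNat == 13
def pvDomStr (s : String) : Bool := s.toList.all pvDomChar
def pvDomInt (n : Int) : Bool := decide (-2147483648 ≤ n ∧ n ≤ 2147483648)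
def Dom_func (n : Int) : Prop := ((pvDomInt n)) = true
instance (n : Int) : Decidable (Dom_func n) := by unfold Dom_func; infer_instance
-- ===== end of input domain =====

-- B replaces A's one-char-at-a-time while loop by a closed-form count and one string repetition (faster).

-- ===== PORT A =====
-- the `while (n >= 2): ans += '1'; n -= 2` loop of A
def funcA_loop (ans : String) (n : Int) : String :=
  if n ≥ 2 then funcA_loop (ans ++ "1") (n - 2) else ans
termination_by n.toNat
decreasing_by omega

def func (n : Int) : List String :=
  let st := if PySem.Int.mod n 2 ≠ 0 then ("" ++ "7", n - 3) else ("", n)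
  [funcA_loop st.1 st.2]

-- ===== PORT B =====
def func_alt (n : Int) : List String :=
  if PySem.Int.mod n 2 ≠ 0 then
    ["7" ++ String.ofList (List.replicate (if n ≥ 3 then PySem.Int.floordiv (n - 3) 2 else 0).toNat '1')]
  else
    [String.ofList (List.replicate (if n ≥ 0 then PySem.Int.floordiv n 2 else 0).toNat '1')]

-- ===== PRECONDITION & SPEC =====
def Spec_func (n : Int) (out : List String) : Prop := out = func_alt n
instance (n : Int) (out : List String) : Decidable (Spec_func n out) := by unfold Spec_func; infer_instance

-- ===== CLAIM (what is proved, stated in full; the proofs are below) =====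
def Claim_equal_func : Prop := ∀ (n : Int), Dom_func n → Spec_func n (func n)

-- ===== LEMMAS AND PROOFS =====

theorem one_cons (l : List Char) : "1" ++ String.ofList l = String.ofList ('1' :: l) := by
  apply String.toList_injective; simp

theorem funcA_loop_eq (ans : String) (n : Int) :
    funcA_loop ans n = ans ++ String.ofList (List.replicate (n / 2).toNat '1') := by
  induction ans, n using funcA_loop.induct with
  | case1 ans n h ih =>
      rw [funcA_loop, if_pos h, ih, String.append_assoc, one_cons]
      have : ((n - 2) / 2).toNat + 1 = (n / 2).toNat := by omega
      rw [← this, List.replicate_succ]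
  | case2 ans n h =>
      rw [funcA_loop, if_neg h]
      have : (n / 2).toNat = 0 := by omega
      rw [this]
      apply String.toList_injective; simp

-- ===== VERDICT (by name: the statement is the Claim_ definition above) =====
theorem func_spec : Claim_equal_func := by
  intro n _
  unfold Spec_func func func_alt
  have hfd : ∀ m : Int, PySem.Int.floordiv m 2 = m / 2 := fun m =>
    PySem.Int.floordiv_eq_ediv_of_pos (by norm_num)
  rw [PySem.Int.mod_eq_emod_of_pos (by norm_num : (0:Int) < 2)]
  by_cases h : n % 2 = 0
  · rw [if_neg (not_not_intro h), if_neg (not_not_intro h)]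
    have e : (n / 2).toNat = (if n ≥ 0 then PySem.Int.floordiv n 2 else 0).toNat := by
      rw [hfd]; split <;> omega
    simp only [funcA_loop_eq, e]
    simp
  · rw [if_pos h, if_pos h]
    have e : ((n - 3) / 2).toNat = (if n ≥ 3 then PySem.Int.floordiv (n - 3) 2 else 0).toNat := by
      rw [hfd]; split <;> omega
    simp only [funcA_loop_eq, e]
    simp
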